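-- pv_equiv track=rewrite | github.com/cynicalanlz/django-test-tasks | task.py | pos_replace
-- ===== SOURCE A (Python) =====
-- def find_all(a_str, sub):
--     start = 0
--     while True:
--         start = a_str.find(sub, start)
--         if start == -1: return
--         yield start
--         start += len(sub) # use start += 1 to find overlapping matches
--
-- def pos_replace(s):
-- 	n = len(s)
-- 	cut = n
-- 	opn = list(find_all(s, '('))
-- 	clz = list(find_all(s, ')'))
-- 	n_opn = len(opn)
-- 	n_clz = len(clz)
--
-- 	if n_opn==0:
-- 		return s
-- 	elif n_clz==0:
-- 		return s[:min(opn)]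
-- 	else:
-- 		m_clz = max(clz)
-- 		rev = list(reversed(opn))
-- 		for x in rev:
-- 			if x > m_clz:
-- 				cut = x
--
-- 	p = cut-1 if cut == n else cut
--
-- 	return s[:cut]
-- ===== SOURCE B (Python) =====
-- def pos_replace(s):
--     last = s.rfind(')')
--     cut = s.find('(', last + 1)
--     return s if cut == -1 else s[:cut]
-- ===== Notes on version B (the rewrite author's own statement) =====
-- stated objective: simpler
-- what changed: Drops the find_all generator and the complete '('/')' index lists (with min, max, reverse and the scan loop); B does two targeted searches, last = s.rfind(')') and cut = s.find('(', last+1), with the single -1 convention absorbing all three of A's branches.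
import Mathlib
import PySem

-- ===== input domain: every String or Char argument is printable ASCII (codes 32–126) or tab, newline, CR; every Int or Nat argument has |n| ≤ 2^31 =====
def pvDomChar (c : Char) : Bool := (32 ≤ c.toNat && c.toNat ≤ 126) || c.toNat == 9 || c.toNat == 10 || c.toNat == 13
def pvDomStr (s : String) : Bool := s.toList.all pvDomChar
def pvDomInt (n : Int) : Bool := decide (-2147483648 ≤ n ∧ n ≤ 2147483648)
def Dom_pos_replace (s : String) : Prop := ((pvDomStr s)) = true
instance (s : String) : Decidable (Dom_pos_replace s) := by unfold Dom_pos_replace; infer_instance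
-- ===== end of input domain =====

-- B replaces A's find_all index-list build (+ min/max/reverse/scan) by two targeted
-- searches rfind(')') / find('(', last+1); objective: simpler, same O(n) cost.

-- ===== PORT A =====
-- Python's find_all generator, on the code-point list.  The fuel argument is only a
-- totality guard: each step moves start past a found occurrence, so a_str.length + 1
-- steps always suffice for the non-empty needles ('(' and ')') A passes in.
def find_all_go (a_str sub : List Char) (fuel : Nat) (start : Nat) : List Int :=
  match fuel with
  | 0 => []
  | fuel + 1 =>
    let f := PySem.Chars.findFrom a_str sub (start : Int)
    if f = -1 then []
    else f :: find_all_go a_str sub fuel (f.toNat + sub.length)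

def find_all (a_str sub : List Char) : List Int :=
  find_all_go a_str sub (a_str.length + 1) 0

def pos_replace (s : String) : String :=
  let n : Int := (s.toList.length : Int)
  let cut : Int := n
  let opn := find_all s.toList ['(']
  let clz := find_all s.toList [')']
  if opn.length = 0 then s
  else if clz.length = 0 then
    PySem.Str.slice s none (some ((PySem.List.min? opn (fun x => x)).getD 0))
  else
    let m_clz := (PySem.List.max? clz (fun x => x)).getD 0
    let rev := opn.reverse
    let cut2 := rev.foldl (fun cut x => if x > m_clz then x else cut) cut
    let _p := if cut2 = n then cut2 - 1 else cut2
    PySem.Str.slice s none (some cut2)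

-- ===== PORT B =====
def pos_replace_alt (s : String) : String :=
  let last := PySem.Str.rfind s ")"
  let cut := PySem.Str.findFrom s "(" (last + 1)
  if cut = -1 then s else PySem.Str.slice s none (some cut)

-- ===== PRECONDITION & SPEC =====
def Spec_pos_replace (s : String) (out : String) : Prop := out = pos_replace_alt s
instance (s : String) (out : String) : Decidable (Spec_pos_replace s out) := by unfold Spec_pos_replace; infer_instance

-- ===== CLAIM (what is proved, stated in full; the proofs are below) =====
def Claim_equal_pos_replace : Prop := ∀ (s : String), Dom_pos_replace s → Spec_pos_replace s (pos_replace s)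

-- ===== LEMMAS AND PROOFS =====

theorem occ_lt {c : Char} {l : List Char} {i : Nat} (h : [c] <+: l.drop i) : i < l.length := by
  have := h.length_le
  simp only [List.length_cons, List.length_nil, List.length_drop] at this
  omega

theorem infix_drop_iff (sub l : List Char) (k : Nat) :
    sub <:+: l.drop k ↔ ∃ i : Nat, k ≤ i ∧ sub <+: l.drop i := by
  rw [← PySem.Chars.isIn_iff_infix, ← PySem.Chars.exists_prefix_drop_iff_isIn]
  constructor
  · rintro ⟨j, hj⟩
    rw [List.drop_drop] at hj
    exact ⟨k + j, by omega, hj⟩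
  · rintro ⟨i, hki, hi⟩
    refine ⟨i - k, ?_⟩
    rw [List.drop_drop, Nat.add_sub_cancel' hki]
    exact hi

theorem mem_find_all_go (l : List Char) (c : Char) (fuel : Nat) :
    ∀ (k : Nat), k ≤ l.length → l.length - k < fuel → ∀ (x : Int),
    (x ∈ find_all_go l [c] fuel k ↔ ∃ i : Nat, x = (i : Int) ∧ k ≤ i ∧ [c] <+: l.drop i) := by
  induction fuel with
  | zero => intro k hk hf; omega
  | succ fuel ih =>
      intro k hk hf x
      rw [find_all_go]
      by_cases h : PySem.Chars.findFrom l [c] (k : Int) = -1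
      · rw [if_pos h]
        simp only [List.not_mem_nil, false_iff]
        rintro ⟨i, rfl, hki, hi⟩
        exact (PySem.Chars.findFrom_natCast_eq_neg_one_iff l [c] k hk).mp h
          ((infix_drop_iff _ _ _).mpr ⟨i, hki, hi⟩)
      · rw [if_neg h]
        obtain ⟨hkf, hpre, hmin⟩ := PySem.Chars.findFrom_natCast_spec l [c] k hk h
        have hf0 : 0 ≤ PySem.Chars.findFrom l [c] (k : Int) :=
          le_trans (Int.natCast_nonneg k) hkf
        have hflt : (PySem.Chars.findFrom l [c] (k : Int)).toNat < l.length := occ_lt hpre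
        have hrec := ih ((PySem.Chars.findFrom l [c] (k : Int)).toNat + [c].length)
          (by simp only [List.length_cons, List.length_nil]; omega)
          (by simp only [List.length_cons, List.length_nil]; omega)
        simp only [List.length_cons, List.length_nil] at hrec ⊢
        rw [List.mem_cons, hrec x]
        constructor
        · rintro (rfl | ⟨i, rfl, hik, hi⟩)
          · exact ⟨(PySem.Chars.findFrom l [c] (k : Int)).toNat,
              (Int.toNat_of_nonneg hf0).symm, by omega, hpre⟩
          · exact ⟨i, rfl, by omega, hi⟩
        · rintro ⟨i, rfl, hki, hi⟩
          by_cases hif : i = (PySem.Chars.findFrom l [c] (k : Int)).toNat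
          · left
            rw [hif, Int.toNat_of_nonneg hf0]
          · right
            have hnlt : ¬ i < (PySem.Chars.findFrom l [c] (k : Int)).toNat :=
              fun hlt => hmin i hki hlt hi
            exact ⟨i, rfl, by omega, hi⟩

theorem pairwise_find_all_go (l : List Char) (c : Char) (fuel : Nat) :
    ∀ (k : Nat), k ≤ l.length → l.length - k < fuel →
    (find_all_go l [c] fuel k).Pairwise (· < ·) := by
  induction fuel with
  | zero => intro k _ _; exact List.Pairwise.nil
  | succ fuel ih =>
      intro k hk hf
      rw [find_all_go]
      by_cases h : PySem.Chars.findFrom l [c] (k : Int) = -1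
      · rw [if_pos h]; exact List.Pairwise.nil
      · rw [if_neg h]
        obtain ⟨hkf, hpre, hmin⟩ := PySem.Chars.findFrom_natCast_spec l [c] k hk h
        have hf0 : 0 ≤ PySem.Chars.findFrom l [c] (k : Int) :=
          le_trans (Int.natCast_nonneg k) hkf
        have hflt : (PySem.Chars.findFrom l [c] (k : Int)).toNat < l.length := occ_lt hpre
        refine List.pairwise_cons.mpr ⟨fun x hx => ?_, ?_⟩
        · obtain ⟨i, rfl, hki, -⟩ := (mem_find_all_go l c fuel _
            (by simp only [List.length_cons, List.length_nil]; omega)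
            (by simp only [List.length_cons, List.length_nil]; omega) x).mp hx
          simp only [List.length_cons, List.length_nil] at hki
          omega
        · exact ih _ (by simp only [List.length_cons, List.length_nil]; omega)
            (by simp only [List.length_cons, List.length_nil]; omega)

theorem mem_find_all (l : List Char) (c : Char) (x : Int) :
    x ∈ find_all l [c] ↔ ∃ i : Nat, x = (i : Int) ∧ [c] <+: l.drop i := by
  unfold find_all
  rw [mem_find_all_go l c (l.length + 1) 0 (Nat.zero_le _) (by omega) x]
  simp

theorem rfind_go_none (l sub : List Char) (j : Nat) :
    PySem.Chars.rfind.go l sub j = -1 ↔ ∀ i ≤ j, ¬ sub <+: l.drop i := by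
  induction j with
  | zero =>
      rw [PySem.Chars.rfind.go]
      split_ifs with hp
      · constructor
        · intro h0; exact absurd h0 (by decide)
        · intro h0
          exact absurd ((List.isPrefixOf_iff_prefix).mp hp)
            (by simpa using h0 0 le_rfl)
      · constructor
        · intro _ i hi
          have hi0 : i = 0 := by omega
          subst hi0
          simp only [List.drop_zero]
          exact fun hq => hp ((List.isPrefixOf_iff_prefix).mpr hq)
        · intro _; rfl
  | succ j ih =>
      rw [PySem.Chars.rfind.go]
      by_cases hp : sub.isPrefixOf (l.drop (j + 1))
      · rw [if_pos hp]
        constructor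
        · intro h; exfalso; omega
        · intro hall
          exact absurd ((List.isPrefixOf_iff_prefix).mp hp) (hall (j + 1) le_rfl)
      · rw [if_neg hp, ih]
        constructor
        · intro h i hi
          by_cases hij : i ≤ j
          · exact h i hij
          · have : i = j + 1 := by omega
            subst this
            exact fun hq => hp ((List.isPrefixOf_iff_prefix).mpr hq)
        · intro h i hi; exact h i (by omega)

theorem rfind_go_spec (l sub : List Char) (j : Nat) (h : PySem.Chars.rfind.go l sub j ≠ -1) :
    0 ≤ PySem.Chars.rfind.go l sub j ∧ (PySem.Chars.rfind.go l sub j).toNat ≤ j ∧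
      sub <+: l.drop (PySem.Chars.rfind.go l sub j).toNat ∧
      ∀ i : Nat, (PySem.Chars.rfind.go l sub j).toNat < i → i ≤ j → ¬ sub <+: l.drop i := by
  induction j with
  | zero =>
      rw [PySem.Chars.rfind.go] at h ⊢
      split_ifs at h ⊢ with hp
      · refine ⟨le_rfl, by simp, by simpa using (List.isPrefixOf_iff_prefix).mp hp,
          fun i h1 h2 => by omega⟩
      · exact absurd rfl h
  | succ j ih =>
      rw [PySem.Chars.rfind.go] at h ⊢
      by_cases hp : sub.isPrefixOf (l.drop (j + 1))
      · rw [if_pos hp] at h ⊢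
        refine ⟨by positivity, by simp, ?_, fun i h1 h2 => ?_⟩
        · simpa using (List.isPrefixOf_iff_prefix).mp hp
        · simp only [Int.toNat_natCast] at h1
          omega
      · rw [if_neg hp] at h ⊢
        obtain ⟨h0, hle, hpre, hmax⟩ := ih h
        refine ⟨h0, by omega, hpre, fun i h1 h2 => ?_⟩
        by_cases hij : i ≤ j
        · exact hmax i h1 hij
        · have : i = j + 1 := by omega
          subst this
          exact fun hq => hp ((List.isPrefixOf_iff_prefix).mpr hq)

theorem rfind_neg_iff (l : List Char) (c : Char) :
    PySem.Chars.rfind l [c] = -1 ↔ ∀ i : Nat, ¬ [c] <+: l.drop i := by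
  unfold PySem.Chars.rfind
  rw [rfind_go_none]
  constructor
  · intro h i hi
    exact h i (Nat.le_of_lt (occ_lt hi)) hi
  · intro h i _
    exact h i

theorem rfind_spec (l : List Char) (c : Char) (h : PySem.Chars.rfind l [c] ≠ -1) :
    0 ≤ PySem.Chars.rfind l [c] ∧ [c] <+: l.drop (PySem.Chars.rfind l [c]).toNat ∧
      ∀ i : Nat, (PySem.Chars.rfind l [c]).toNat < i → ¬ [c] <+: l.drop i := by
  unfold PySem.Chars.rfind at *
  obtain ⟨h0, hle, hpre, hmax⟩ := rfind_go_spec l [c] l.length h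
  refine ⟨h0, hpre, fun i hi hip => ?_⟩
  exact hmax i hi (Nat.le_of_lt (occ_lt hip)) hip

theorem find?_pairwise_min {xs : List Int} (hp : xs.Pairwise (· < ·)) {m y : Int}
    (h : xs.find? (fun x => decide (m < x)) = some y) :
    y ∈ xs ∧ m < y ∧ ∀ z ∈ xs, m < z → y ≤ z := by
  induction xs with
  | nil => simp at h
  | cons a t ih =>
      obtain ⟨ha, ht⟩ := List.pairwise_cons.mp hp
      by_cases hma : m < a
      · have hay : a = y := by simpa [List.find?_cons, hma] using h
        subst hay
        refine ⟨List.mem_cons_self, hma, fun z hz hmz => ?_⟩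
        rcases List.mem_cons.mp hz with rfl | hz'
        · exact le_rfl
        · exact le_of_lt (ha z hz')
      · have h' : t.find? (fun x => decide (m < x)) = some y := by
          simpa [List.find?_cons, hma] using h
        obtain ⟨hy, hmy, hmin⟩ := ih ht h'
        refine ⟨List.mem_cons_of_mem a hy, hmy, fun z hz hmz => ?_⟩
        rcases List.mem_cons.mp hz with rfl | hz'
        · exact absurd hmz hma
        · exact hmin z hz' hmz

theorem foldl_rev_find? (xs : List Int) (m init : Int) :
    xs.reverse.foldl (fun cut x => if x > m then x else cut) init
      = ((xs.find? (fun x => decide (m < x))).getD init) := by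
  rw [List.foldl_reverse]
  induction xs with
  | nil => simp
  | cons a t ih =>
      by_cases hma : m < a
      · simp [List.find?_cons, hma]
      · simp [List.find?_cons, hma, ih]

theorem pos_replace_chars_eq (s : String) : pos_replace s = pos_replace_alt s := by
  have hpl : ("(" : String).toList = ['('] := rfl
  have hcl : (")" : String).toList = [')'] := rfl
  unfold pos_replace pos_replace_alt
  simp only [PySem.Str.rfind_eq, PySem.Str.findFrom_eq, hpl, hcl]
  set L := s.toList with hL
  set opn := find_all L ['('] with hopn
  set clz := find_all L [')'] with hclz
  set r := PySem.Chars.rfind L [')'] with hrdef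
  set f := PySem.Chars.findFrom L ['('] (r + 1) with hfdef
  have hOm : ∀ x : Int, x ∈ opn ↔ ∃ i : Nat, x = (i : Int) ∧ ['('] <+: L.drop i := by
    intro x; rw [hopn]; exact mem_find_all L '(' x
  have hCm : ∀ x : Int, x ∈ clz ↔ ∃ i : Nat, x = (i : Int) ∧ [')'] <+: L.drop i := by
    intro x; rw [hclz]; exact mem_find_all L ')' x
  have hOsorted : opn.Pairwise (· < ·) := by
    rw [hopn]; exact pairwise_find_all_go L '(' (L.length + 1) 0 (Nat.zero_le _) (by omega)
  by_cases hop : opn.length = 0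
  · -- Python branch: no '(' at all, A returns s
    rw [if_pos hop]
    have hne : opn = [] := List.length_eq_zero_iff.mp hop
    have hno : ∀ i : Nat, ¬ ['('] <+: L.drop i := by
      intro i hi
      have hmem : ((i : Int)) ∈ opn := (hOm _).mpr ⟨i, rfl, hi⟩
      simp [hne] at hmem
    have hf : f = -1 := by
      rw [hfdef]
      by_cases hrneg : r = -1
      · rw [hrneg]
        norm_num
        rw [PySem.Chars.find_eq_neg_one_iff]
        intro hinf
        obtain ⟨i, -, hi⟩ := (infix_drop_iff _ _ 0).mp (by simpa using hinf)
        exact hno i hi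
      · have hrspec := rfind_spec L ')' (by rwa [← hrdef])
        rw [← hrdef] at hrspec
        obtain ⟨hr0, hrpre, -⟩ := hrspec
        have hlt : r.toNat < L.length := occ_lt hrpre
        have hcast : r + 1 = ((r.toNat + 1 : Nat) : Int) := by push_cast; omega
        rw [hcast, PySem.Chars.findFrom_natCast_eq_neg_one_iff _ _ _ (by omega)]
        intro hinf
        obtain ⟨i, -, hi⟩ := (infix_drop_iff _ _ _).mp hinf
        exact hno i hi
    rw [if_pos hf]
  · rw [if_neg hop]
    have hopne : opn ≠ [] := fun h => hop (by simp [h])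
    by_cases hclz0 : clz.length = 0
    · -- Python branch: '(' present, no ')', A returns s[:min(opn)]
      rw [if_pos hclz0]
      have hceq : clz = [] := List.length_eq_zero_iff.mp hclz0
      have hnoc : ∀ i : Nat, ¬ [')'] <+: L.drop i := by
        intro i hi
        have hmem : ((i : Int)) ∈ clz := (hCm _).mpr ⟨i, rfl, hi⟩
        simp [hceq] at hmem
      have hrneg : r = -1 := by rw [hrdef]; exact (rfind_neg_iff L ')').mpr hnoc
      obtain ⟨x0, hx0⟩ := List.exists_mem_of_ne_nil opn hopne
      obtain ⟨i0, rfl, hi0⟩ := (hOm x0).mp hx0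
      have hinf : ['('] <:+: L := by
        have h := (infix_drop_iff ['('] L 0).mpr ⟨i0, Nat.zero_le _, hi0⟩
        simpa using h
      have hfind0 : 0 ≤ PySem.Chars.find L ['('] := (PySem.Chars.find_nonneg_iff _ _).mpr hinf
      obtain ⟨hfpre, hfmin⟩ := PySem.Chars.find_spec hfind0
      have hf : f = PySem.Chars.find L ['('] := by
        rw [hfdef, hrneg]
        norm_num [PySem.Chars.findFrom_zero]
      cases hmin : PySem.List.min? opn (fun x => x) with
      | none => exact absurd ((PySem.List.min?_eq_none_iff _ _).mp hmin) hopne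
      | some m =>
          have hm_mem := PySem.List.min?_mem hmin
          have hm_min := PySem.List.min?_isMin hmin
          obtain ⟨j, rfl, hj⟩ := (hOm m).mp hm_mem
          have h1 : ((j : Int)) ≤ ((PySem.Chars.find L ['(']).toNat : Int) :=
            hm_min _ ((hOm _).mpr ⟨_, rfl, hfpre⟩)
          have h2 : ¬ j < (PySem.Chars.find L ['(']).toNat := fun h => hfmin j h hj
          have htn := Int.toNat_of_nonneg hfind0
          have hmf : ((j : Int)) = PySem.Chars.find L ['('] := by omega
          rw [if_neg (show ¬ f = -1 by rw [hf]; omega)]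
          simp only [Option.getD_some]
          rw [hmf, hf]
    · -- Python branch: both present, A scans reversed opn for the least index > max(clz)
      rw [if_neg hclz0]
      have hclne : clz ≠ [] := fun h => hclz0 (by simp [h])
      obtain ⟨x0, hx0⟩ := List.exists_mem_of_ne_nil clz hclne
      obtain ⟨i0, rfl, hi0⟩ := (hCm x0).mp hx0
      have hrne : r ≠ -1 := by
        rw [hrdef]
        intro h
        exact (rfind_neg_iff L ')').mp h i0 hi0
      have hrspec := rfind_spec L ')' (by rwa [← hrdef])
      rw [← hrdef] at hrspec
      obtain ⟨hr0, hrpre, hrmax⟩ := hrspec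
      have hrlt : r.toNat < L.length := occ_lt hrpre
      have hrtn := Int.toNat_of_nonneg hr0
      have hcast : r + 1 = ((r.toNat + 1 : Nat) : Int) := by push_cast; omega
      cases hmax : PySem.List.max? clz (fun x => x) with
      | none => exact absurd ((PySem.List.max?_eq_none_iff _ _).mp hmax) hclne
      | some m =>
          obtain ⟨j, rfl, hj⟩ := (hCm m).mp (PySem.List.max?_mem hmax)
          have hmax_all := PySem.List.max?_isMax hmax
          have h1 : ((r.toNat : Nat) : Int) ≤ (j : Int) :=
            hmax_all _ ((hCm _).mpr ⟨r.toNat, rfl, hrpre⟩)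
          have h2 : ¬ r.toNat < j := fun h => hrmax j h hj
          have hmr : ((j : Int)) = r := by omega
          generalize hgen : (Option.getD (some ((j : Nat) : Int)) (0 : Int)) = m
          have hm : m = (j : Int) := by rw [← hgen]; rfl
          rw [foldl_rev_find? opn m ((L.length : Nat) : Int)]
          by_cases hfneg : f = -1
          · rw [if_pos hfneg]
            have hnof : ∀ i : Nat, r.toNat + 1 ≤ i → ¬ ['('] <+: L.drop i := by
              intro i hle hi
              have hf' : f = -1 := hfneg
              rw [hfdef, hcast] at hf'
              exact (PySem.Chars.findFrom_natCast_eq_neg_one_iff _ _ _ (by omega)).mp hf'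
                ((infix_drop_iff _ _ _).mpr ⟨i, hle, hi⟩)
            have hfind_none : opn.find? (fun x => decide (m < x)) = none := by
              rw [List.find?_eq_none]
              intro x hx hdx
              obtain ⟨i, rfl, hi⟩ := (hOm x).mp hx
              simp only [decide_eq_true_eq] at hdx
              exact hnof i (by omega) hi
            rw [hfind_none]
            simp only [Option.getD_none]
            refine String.toList_inj.mp ?_
            show (PySem.Str.slice s none (some ((L.length : Nat) : Int))).toList = s.toList
            rw [PySem.Str.slice, String.toList_ofList, PySem.Chars.slice_eq_listSlice,
              PySem.List.slice_to _ (by positivity), Int.toNat_natCast, ← hL, List.take_length]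
          · rw [if_neg hfneg]
            have hfspec := PySem.Chars.findFrom_natCast_spec L ['('] (r.toNat + 1) (by omega)
              (by rw [← hcast, ← hfdef]; exact hfneg)
            rw [← hcast, ← hfdef] at hfspec
            obtain ⟨hkf, hfpre, hfmin⟩ := hfspec
            have hf0 : 0 ≤ f := le_trans (by positivity) hkf
            have hftn := Int.toNat_of_nonneg hf0
            have hsome : ∃ y, opn.find? (fun x => decide (m < x)) = some y := by
              have hiss : (opn.find? (fun x => decide (m < x))).isSome :=
                List.find?_isSome.mpr ⟨((f.toNat : Nat) : Int), (hOm _).mpr ⟨f.toNat, rfl, hfpre⟩,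
                  by simp only [decide_eq_true_eq]; omega⟩
              exact Option.isSome_iff_exists.mp hiss
            obtain ⟨y, hy⟩ := hsome
            obtain ⟨hymem, hmy, hymin⟩ := find?_pairwise_min hOsorted hy
            obtain ⟨jy, rfl, hjy⟩ := (hOm y).mp hymem
            have hjy_ge : r.toNat + 1 ≤ jy := by omega
            have hjy_nlt : ¬ jy < f.toNat := fun h => hfmin jy hjy_ge h hjy
            have hle : ((jy : Nat) : Int) ≤ ((f.toNat : Nat) : Int) :=
              hymin _ ((hOm _).mpr ⟨f.toNat, rfl, hfpre⟩) (by omega)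
            have hyf : ((jy : Nat) : Int) = f := by omega
            rw [hy]
            simp only [Option.getD_some]
            rw [hyf]

-- ===== VERDICT (by name: the statement is the Claim_ definition above) =====
theorem pos_replace_spec : Claim_equal_pos_replace := by
  intro s _
  unfold Spec_pos_replace
  exact pos_replace_chars_eq s
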